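-- pv_equiv track=rewrite | github.com/MrIsaar/MachineLearning | playground.py | loop
-- ===== SOURCE A (Python) =====
-- def createArray(size,zero=False,transposed = False):
--     arr = []
--     if transposed:
--         for i in range(0,size):
--             arrinner = []
--             for j in range(0,size):
--                 if zero:
--                     arrinner.append(0)
--                 else:
--                     arrinner.append(j + i+1)
--             arr.append(arrinner)
--         return arr
--     for i in range(0,size):
--         arrinner = []
--         for j in range(0,size):
--             if zero:
--                 arrinner.append(0)
--             else:
--                 arrinner.append(j + i+1)
--         arr.append(arrinner)
--     return arr
--
-- def loop(size=512):
--
--     a = createArray(size)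
--     b = createArray(size,transposed=True)
--     c = createArray(size,True)
--
--     for i in range(0,size):
--         for j in range(0,size):
--             for k in range(j,size): #i = val,k occurs val  0,1 1,2 2,3
--                 c[i][j] += a[i][k]*b[k][j]
--     return c
-- ===== SOURCE B (Python) =====
-- def loop(size=512):
--     n = size if size > 0 else 0
--     # suffix sums over k = j..n-1: suf[j] = (count, sum k, sum k^2)
--     suf = [(0, 0, 0)]
--     for j in range(n - 1, -1, -1):
--         s0, s1, s2 = suf[0]
--         suf.insert(0, (s0 + 1, s1 + j, s2 + j * j))
--     return [[s2 + (i + j + 2) * s1 + (i + 1) * (j + 1) * s0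
--              for j, (s0, s1, s2) in enumerate(suf[:n])]
--             for i in range(n)]
-- ===== Notes on version B (the rewrite author's own statement) =====
-- stated objective: faster
-- what changed: Replaces the cubic triple loop by expanding each cell's summand into a quadratic polynomial in k and precomputing suffix sums of the zeroth, first and second powers of k in one backward pass, so every cell becomes a constant-time polynomial evaluation.
import Mathlib
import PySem

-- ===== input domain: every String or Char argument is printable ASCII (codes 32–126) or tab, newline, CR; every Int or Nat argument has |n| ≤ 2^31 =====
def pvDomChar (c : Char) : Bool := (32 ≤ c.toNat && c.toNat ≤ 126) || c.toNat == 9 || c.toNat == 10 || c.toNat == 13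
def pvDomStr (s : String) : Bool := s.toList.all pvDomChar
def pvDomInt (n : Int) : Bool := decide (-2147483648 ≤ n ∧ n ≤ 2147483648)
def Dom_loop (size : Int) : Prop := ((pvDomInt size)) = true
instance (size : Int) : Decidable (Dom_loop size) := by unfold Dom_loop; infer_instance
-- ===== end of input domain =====

-- B replaces A's O(n^3) triple loop by a backward pass of suffix sums of 1, k, k^2
-- and a per-cell polynomial evaluation (objective: faster, asymptotically).

-- ===== PORT A =====
-- Python's c[i][j] / a[i][k] / b[k][j] with indices drawn from range(0, size):
-- plain non-negative in-range indexing, ported via toNat (exact for 0 ≤ index).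
def get2 (m : List (List Int)) (i j : Int) : Int :=
  (m.getD i.toNat []).getD j.toNat 0

def set2 (m : List (List Int)) (i j : Int) (v : Int) : List (List Int) :=
  m.modify i.toNat (fun row => row.set j.toNat v)

def createArray (size : Int) (zero : Bool) (transposed : Bool) : List (List Int) :=
  if transposed then
    (PySem.List.pyRange 0 size 1).foldl (fun arr i =>
      arr ++ [(PySem.List.pyRange 0 size 1).foldl (fun arrinner j =>
        arrinner ++ [if zero then 0 else j + i + 1]) []]) []
  else
    (PySem.List.pyRange 0 size 1).foldl (fun arr i =>
      arr ++ [(PySem.List.pyRange 0 size 1).foldl (fun arrinner j =>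
        arrinner ++ [if zero then 0 else j + i + 1]) []]) []

def loop (size : Int) : List (List Int) :=
  let a := createArray size false false
  let b := createArray size false true
  let c := createArray size true false
  (PySem.List.pyRange 0 size 1).foldl (fun c i =>
    (PySem.List.pyRange 0 size 1).foldl (fun c j =>
      (PySem.List.pyRange j size 1).foldl (fun c k =>
        set2 c i j (get2 c i j + get2 a i k * get2 b k j)) c) c) c

-- ===== PORT B =====
-- the backward 'for j in range(n-1, -1, -1): suf.insert(0, …)' loop of Source B
def sufBuild : Nat → List (Int × Int × Int) → List (Int × Int × Int)
  | 0, acc => acc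
  | j + 1, acc =>
    match acc.headD (0, 0, 0) with
    | (s0, s1, s2) => sufBuild j ((s0 + 1, s1 + (j : Int), s2 + (j : Int) * (j : Int)) :: acc)

def loop_alt (size : Int) : List (List Int) :=
  let n : Nat := size.toNat          -- n = size if size > 0 else 0
  let suf := sufBuild n [(0, 0, 0)]
  (List.range n).map (fun i =>
    (PySem.List.enumerate (suf.take n) 0).map (fun p =>
      match p with
      | (j, (s0, s1, s2)) =>
        s2 + ((i : Int) + j + 2) * s1 + ((i : Int) + 1) * (j + 1) * s0))

-- ===== PRECONDITION & SPEC =====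
def Spec_loop (size : Int) (out : List (List Int)) : Prop := out = loop_alt size
instance (size : Int) (out : List (List Int)) : Decidable (Spec_loop size out) := by unfold Spec_loop; infer_instance

-- ===== CLAIM (what is proved, stated in full; the proofs are below) =====
def Claim_equal_loop : Prop := ∀ (size : Int), Dom_loop size → Spec_loop size (loop size)

-- ===== LEMMAS AND PROOFS =====

def M (n : Nat) (f : Nat → Nat → Int) : List (List Int) :=
  (List.range n).map (fun i => (List.range n).map (fun j => f i j))

theorem get2_M {n : Nat} (f : Nat → Nat → Int) {i j : Nat} (hi : i < n) (hj : j < n) :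
    get2 (M n f) (i : Int) (j : Int) = f i j := by
  simp [get2, M, List.getD_eq_getElem?_getD, hi, hj]

theorem set2_M {n : Nat} (f : Nat → Nat → Int) {i j : Nat} (hi : i < n) (hj : j < n) (v : Int) :
    set2 (M n f) (i : Int) (j : Int) v
      = M n (fun p q => if p = i ∧ q = j then v else f p q) := by
  unfold set2 M
  apply List.ext_getElem
  · simp
  · intro p h1 h2
    rw [List.getElem_modify]
    simp only [List.getElem_map, List.getElem_range]
    by_cases hp : p = i
    · subst hp
      simp only [Int.toNat_natCast]
      apply List.ext_getElem
      · simp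
      · intro q hq1 hq2
        simp only [List.getElem_map, List.getElem_range]
        simp only [if_true]
        by_cases hq : q = j
        · subst hq; simp [List.getElem_set_self]
        · simp [List.getElem_set_ne, hq, Ne.symm hq]
    · simp only [Int.toNat_natCast, if_neg (Ne.symm hp)]
      simp [hp]
theorem M_congr {n : Nat} {f g : Nat → Nat → Int}
    (h : ∀ p q, p < n → q < n → f p q = g p q) : M n f = M n g := by
  unfold M
  refine List.map_congr_left (fun p hp => ?_)
  exact List.map_congr_left (fun q hq => h p q (List.mem_range.mp hp) (List.mem_range.mp hq))

theorem kfold_M {n : Nat} (ks : List Int) (g : Int → Int) {i j : Nat}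
    (hi : i < n) (hj : j < n) (f : Nat → Nat → Int) :
    ks.foldl (fun c k => set2 c (i : Int) (j : Int) (get2 c (i : Int) (j : Int) + g k)) (M n f)
      = M n (fun p q => if p = i ∧ q = j then f i j + (ks.map g).sum else f p q) := by
  induction ks generalizing f with
  | nil =>
    simp only [List.foldl_nil, List.map_nil, List.sum_nil, add_zero]
    refine M_congr (fun p q _ _ => ?_)
    by_cases h : p = i ∧ q = j
    · obtain ⟨rfl, rfl⟩ := h; simp
    · simp [h]
  | cons k ks ih =>
    simp only [List.foldl_cons, get2_M f hi hj, set2_M f hi hj, List.map_cons, List.sum_cons]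
    rw [ih]
    exact M_congr (fun p q _ _ => by
      by_cases h : p = i ∧ q = j
      · simp [h]; ring
      · simp [h])
-- the per-cell sum A accumulates, as a list sum over the k-range
def wSum (A B : List (List Int)) (size : Int) (i j : Nat) : Int :=
  ((PySem.List.pyRange (j : Int) size 1).map
    (fun k => get2 A (i : Int) k * get2 B k (j : Int))).sum

theorem jfold_M {n : Nat} (A B : List (List Int)) (size : Int) {i : Nat} (hi : i < n) :
    ∀ (m : Nat), m ≤ n → ∀ (f : Nat → Nat → Int),
    (PySem.List.pyRange 0 (m : Int) 1).foldl
      (fun c j => (PySem.List.pyRange j size 1).foldl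
        (fun c k => set2 c (i : Int) j (get2 c (i : Int) j + get2 A (i : Int) k * get2 B k j)) c)
      (M n f)
    = M n (fun p q => if p = i ∧ q < m then f p q + wSum A B size p q else f p q) := by
  intro m
  induction m with
  | zero => intro _ f; simp
  | succ m ih =>
    intro hm f
    have hm' : m ≤ n := Nat.le_of_succ_le hm
    have hstep : PySem.List.pyRange 0 ((m + 1 : Nat) : Int) 1
        = PySem.List.pyRange 0 (m : Int) 1 ++ [(m : Int)] := by
      push_cast
      exact PySem.List.pyRange_one_succ_right (by positivity)
    rw [hstep, List.foldl_append, ih hm' f]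
    simp only [List.foldl_cons, List.foldl_nil]
    rw [kfold_M (PySem.List.pyRange (m : Int) size 1)
      (fun k => get2 A (i : Int) k * get2 B k (m : Int)) hi hm]
    refine M_congr (fun p q hp hq => ?_)
    by_cases hpi : p = i
    · subst hpi
      by_cases hq1 : q = m
      · subst hq1
        simp [wSum]
      · have hlt : q < m + 1 ↔ q < m := by omega
        by_cases hq2 : q < m <;> simp [hq1, hq2, hlt]
    · simp [hpi]
theorem ifold_M {n : Nat} (A B : List (List Int)) (size : Int) :
    ∀ (m : Nat), m ≤ n → ∀ (f : Nat → Nat → Int),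
    (PySem.List.pyRange 0 (m : Int) 1).foldl
      (fun c i => (PySem.List.pyRange 0 (n : Int) 1).foldl
        (fun c j => (PySem.List.pyRange j size 1).foldl
          (fun c k => set2 c i j (get2 c i j + get2 A i k * get2 B k j)) c) c)
      (M n f)
    = M n (fun p q => if p < m then f p q + wSum A B size p q else f p q) := by
  intro m
  induction m with
  | zero => intro _ f; simp
  | succ m ih =>
    intro hm f
    have hm' : m ≤ n := Nat.le_of_succ_le hm
    have hstep : PySem.List.pyRange 0 ((m + 1 : Nat) : Int) 1
        = PySem.List.pyRange 0 (m : Int) 1 ++ [(m : Int)] := by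
      push_cast
      exact PySem.List.pyRange_one_succ_right (by positivity)
    rw [hstep, List.foldl_append, ih hm' f]
    simp only [List.foldl_cons, List.foldl_nil]
    rw [jfold_M A B size (show m < n from hm) n le_rfl]
    refine M_congr (fun p q hp hq => ?_)
    by_cases hpm : p = m
    · subst hpm
      simp [hq]
    · have hlt : p < m + 1 ↔ p < m := by omega
      by_cases hp2 : p < m <;> simp [hpm, hp2, hlt]
theorem pyRange_toNat (size : Int) :
    PySem.List.pyRange 0 size 1 = PySem.List.pyRange 0 ((size.toNat : Nat) : Int) 1 := by
  rw [PySem.List.pyRange_one, PySem.List.pyRange_one]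
  simp only [sub_zero, Int.toNat_natCast]

theorem createArray_eq (size : Int) (zero tr : Bool) :
    createArray size zero tr
      = M size.toNat (fun i j => if zero then 0 else (j : Int) + (i : Int) + 1) := by
  have h : PySem.List.pyRange 0 size 1 = (List.range size.toNat).map (Nat.cast : Nat → Int) := by
    rw [PySem.List.pyRange_one]
    simp only [sub_zero]
    exact List.map_congr_left (fun t _ => by omega)
  unfold createArray M
  cases tr <;>
    simp only [Bool.false_eq_true, if_false] <;>
    rw [h, PySem.List.foldl_append_singleton_eq_map] <;>
    simp only [List.nil_append, List.map_map] <;>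
    refine List.map_congr_left (fun p _ => ?_) <;>
    simp only [Function.comp_apply] <;>
    rw [PySem.List.foldl_append_singleton_eq_map] <;>
    simp [List.map_map, Function.comp]

theorem loop_eq_M (size : Int) :
    loop size = M size.toNat
      (fun p q => wSum (createArray size false false) (createArray size false true) size p q) := by
  unfold loop
  dsimp only
  have hzero : createArray size true false = M size.toNat (fun _ _ => (0 : Int)) := by
    rw [createArray_eq]; simp
  rw [hzero, pyRange_toNat size, ifold_M _ _ size size.toNat le_rfl]
  exact M_congr (fun p q hp hq => by simp [hp])
def specCell (n i j : Nat) : Int :=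
  ∑ k ∈ Finset.Ico j n, (((k : Int) + i + 1) * ((j : Int) + k + 1))

theorem wSum_eq (size : Int) {n : Nat} (hn : n = size.toNat) {i j : Nat} (hi : i < n) (hj : j < n) :
    wSum (createArray size false false) (createArray size false true) size i j = specCell n i j := by
  unfold wSum
  rw [createArray_eq, createArray_eq, ← hn]
  have hcong : ∀ k ∈ PySem.List.pyRange (j : Int) size 1,
      get2 (M n fun i j => if false then 0 else (j : Int) + i + 1) (i : Int) k *
        get2 (M n fun i j => if false then 0 else (j : Int) + i + 1) k (j : Int)
      = ((k : Int) + i + 1) * ((j : Int) + k + 1) := by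
    intro k hk
    rw [PySem.List.mem_pyRange_one] at hk
    have h0 : (0 : Int) ≤ k := le_trans (by positivity) hk.1
    have hkn : k.toNat < n := by omega
    have hk' : ((k.toNat : Nat) : Int) = k := Int.toNat_of_nonneg h0
    rw [← hk', get2_M _ hi hkn, get2_M _ hkn hj]
    simp
  rw [List.map_congr_left hcong, PySem.List.pyRange_one]
  have hlen : (size - (j : Int)).toNat = n - j := by omega
  rw [hlen, List.map_map, specCell, Finset.sum_Ico_eq_sum_range]
  have hpt : ((fun a => (a + (i : Int) + 1) * ((j : Int) + a + 1)) ∘ fun k : Nat => ((j : Int) + (k : Int)))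
      = fun t : Nat => (((j + t : Nat) : Int) + i + 1) * ((j : Int) + ((j + t : Nat) : Int) + 1) := by
    funext t
    simp only [Function.comp_apply]
    push_cast
    ring
  rw [hpt]
  exact Int.neg_inj.mp rfl


-- the triple of suffix sums Source B keeps: (Σ1, Σk, Σk²) over k ∈ [j, n)
def S (n j : Nat) : Int × Int × Int :=
  (((n - j : Nat) : Int), ∑ k ∈ Finset.Ico j n, (k : Int), ∑ k ∈ Finset.Ico j n, (k : Int) * (k : Int))

theorem S_step {n m : Nat} (h : m < n) :
    S n m = ((S n (m + 1)).1 + 1, (S n (m + 1)).2.1 + (m : Int), (S n (m + 1)).2.2 + (m : Int) * (m : Int)) := by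
  unfold S
  refine Prod.ext ?_ (Prod.ext ?_ ?_) <;> simp only []
  · omega
  · rw [Finset.sum_eq_sum_Ico_succ_bot h]; ring
  · rw [Finset.sum_eq_sum_Ico_succ_bot h]; ring

theorem sufBuild_inv (n : Nat) :
    ∀ (m : Nat), m ≤ n →
      sufBuild m ((List.range (n + 1 - m)).map (fun t => S n (m + t)))
        = (List.range (n + 1)).map (S n) := by
  intro m
  induction m with
  | zero => intro _; simp [sufBuild]
  | succ m ih =>
    intro hm
    have hm' : m ≤ n := Nat.le_of_succ_le hm
    unfold sufBuild
    have hpos : n + 1 - (m + 1) = (n - m - 1) + 1 := by omega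
    rw [hpos, List.range_succ_eq_map, List.map_cons, List.map_map]
    simp only [List.headD_cons, Nat.add_zero]
    rw [← S_step (show m < n by omega)]
    have hlist : (S n m) :: S n (m + 1) :: (List.range (n - m - 1)).map ((fun t => S n (m + 1 + t)) ∘ Nat.succ)
        = (List.range (n + 1 - m)).map (fun t => S n (m + t)) := by
      have h2 : n + 1 - m = (n - m - 1) + 1 + 1 := by omega
      rw [h2, List.range_succ_eq_map, List.range_succ_eq_map]
      simp only [List.map_cons, List.map_map, Nat.add_zero]
      refine congrArg₂ _ rfl (congrArg₂ _ ?_ ?_)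
      · exact congrArg (S n) (by omega)
      · exact List.map_congr_left (fun t _ => by
          simp only [Function.comp_apply]
          exact congrArg (S n) (by omega))
    rw [hlist]
    exact ih hm'
theorem suf_eq (n : Nat) : sufBuild n [(0, 0, 0)] = (List.range (n + 1)).map (S n) := by
  have h : [((0 : Int), (0 : Int), (0 : Int))]
      = (List.range (n + 1 - n)).map (fun t => S n (n + t)) := by
    have h1 : n + 1 - n = 1 := by omega
    rw [h1]
    simp [S, List.range_succ]
  rw [h]
  exact sufBuild_inv n n le_rfl

theorem enum_map_range {α : Type} : ∀ (n : Nat) (f : Nat → α) (s : Int),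
    PySem.List.enumerate ((List.range n).map f) s
      = (List.range n).map (fun (j : Nat) => (s + (j : Int), f j)) := by
  intro n
  induction n with
  | zero => intro f s; simp
  | succ n ih =>
    intro f s
    rw [List.range_succ_eq_map, List.map_cons, PySem.List.enumerate_cons, List.map_map,
      ih (f ∘ Nat.succ) (s + 1), List.map_cons, List.map_map]
    refine congrArg₂ _ (by simp) ?_
    refine List.map_congr_left (fun t _ => ?_)
    simp only [Function.comp_apply]
    refine congrArg₂ _ ?_ rfl
    push_cast
    ring

theorem cell_eq (n i j : Nat) :
    (S n j).2.2 + ((i : Int) + (j : Int) + 2) * (S n j).2.1 + ((i : Int) + 1) * ((j : Int) + 1) * (S n j).1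
      = specCell n i j := by
  unfold S specCell
  have h : ∀ k ∈ Finset.Ico j n, ((k : Int) + i + 1) * ((j : Int) + k + 1)
      = (k : Int) * k + ((i : Int) + j + 2) * k + ((i : Int) + 1) * ((j : Int) + 1) := by
    intro k _
    ring
  rw [Finset.sum_congr rfl h, Finset.sum_add_distrib, Finset.sum_add_distrib, ← Finset.mul_sum,
    Finset.sum_const, Nat.card_Ico, nsmul_eq_mul]
  ring

theorem loop_alt_eq_M (size : Int) :
    loop_alt size = M size.toNat (fun i j => specCell size.toNat i j) := by
  unfold loop_alt M
  dsimp only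
  rw [suf_eq, ← List.map_take, List.take_range, Nat.min_eq_left (Nat.le_succ _),
    enum_map_range size.toNat (S size.toNat) 0]
  refine List.map_congr_left (fun i _ => ?_)
  rw [List.map_map]
  refine List.map_congr_left (fun j _ => ?_)
  simp only [Function.comp_apply, zero_add]
  rw [← cell_eq size.toNat i j]

-- ===== VERDICT (by name: the statement is the Claim_ definition above) =====
theorem loop_spec : Claim_equal_loop := by
  intro size _
  unfold Spec_loop
  rw [loop_eq_M, loop_alt_eq_M]
  exact M_congr (fun p q hp hq => wSum_eq size rfl hp hq)
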